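-- pv_equiv track=rewrite | github.com/ares5221/Data-Structures-and-Algorithms | 07排序/12BFPRT.py | split_insertSort
-- ===== SOURCE A (Python) =====
-- def split_insertSort(array, group_num):
--     for k in range(group_num):
--         start = k * 5  # 需排序的子数组起点
--         end = min((k + 1) * 5, len(array))  # 需排序的子数组终点
--         for i in range(start + 1, end):
--             if array[i - 1] > array[i]:
--                 temp = array[i]  # 当前需要排序的元素
--                 index = i  # 用来记录排序元素需要插入的位置
--                 while index > start and array[index - 1] > temp:
--                     array[index] = array[index - 1]  # 把已经排序好的元素后移一位，留下需要插入的位置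
--                     index -= 1
--                 array[index] = temp  # 把需要排序的元素，插入到指定位置
--     return array
-- ===== SOURCE B (Python) =====
-- def split_insertSort(array, group_num):
--     for k in range(group_num):
--         start = k * 5
--         end = min((k + 1) * 5, len(array))
--         array[start:end] = sorted(array[start:end])
--     return array
-- ===== Notes on version B (the rewrite author's own statement) =====
-- stated objective: simpler
-- what changed: The hand-rolled in-place insertion sort of each 5-element group (inner for + shifting while loop) is replaced by one slice assignment per group that delegates to Python's built-in stable sorted().
import Mathlib
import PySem

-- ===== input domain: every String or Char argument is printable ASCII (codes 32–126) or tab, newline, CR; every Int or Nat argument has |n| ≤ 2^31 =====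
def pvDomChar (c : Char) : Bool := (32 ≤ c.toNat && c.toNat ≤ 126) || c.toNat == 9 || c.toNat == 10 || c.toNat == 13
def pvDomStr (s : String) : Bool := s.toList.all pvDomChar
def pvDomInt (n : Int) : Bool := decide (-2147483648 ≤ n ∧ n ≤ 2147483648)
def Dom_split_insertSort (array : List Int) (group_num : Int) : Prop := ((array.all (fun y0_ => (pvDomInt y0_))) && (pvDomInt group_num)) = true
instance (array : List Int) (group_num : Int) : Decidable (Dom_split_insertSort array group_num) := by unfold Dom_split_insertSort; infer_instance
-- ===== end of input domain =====

-- B replaces the hand-rolled per-5-group insertion sort with one slice assignment per group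
-- delegating to the built-in stable sort; return value only is compared (both Pythons mutate
-- `array` in place identically and return the same object).


-- ===== PORT A =====
-- the `while index > start and array[index-1] > temp: array[index] = array[index-1]; index -= 1`
-- loop; returns the shifted array together with the final `index`
def shiftA (arr : List Int) (s : Int) (index : Int) (temp : Int) : List Int × Int :=
  if h : index > s ∧ PySem.List.pyGetD arr (index - 1) 0 > temp then
    shiftA (PySem.List.pySetD arr index (PySem.List.pyGetD arr (index - 1) 0)) s (index - 1) temp
  else (arr, index)
termination_by (index - s).toNat
decreasing_by omega

-- one iteration of `for i in range(start+1, end)`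
def bodyA (s : Int) (arr : List Int) (i : Int) : List Int :=
  if PySem.List.pyGetD arr (i - 1) 0 > PySem.List.pyGetD arr i 0 then
    let temp := PySem.List.pyGetD arr i 0
    let p := shiftA arr s i temp
    PySem.List.pySetD p.1 p.2 temp
  else arr

def split_insertSort (array : List Int) (group_num : Int) : List Int :=
  (PySem.List.pyRange 0 group_num 1).foldl (fun arr k =>
    let s := k * 5
    let e := min ((k + 1) * 5) (arr.length : Int)
    (PySem.List.pyRange (s + 1) e 1).foldl (bodyA s) arr) array

-- ===== PORT B =====
-- `array[start:end] = sorted(array[start:end])`: since 0 ≤ start ≤ end ≤ len here, the slice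
-- assignment is exactly take-clamp ++ sorted slice ++ drop-clamp
def split_insertSort_alt (array : List Int) (group_num : Int) : List Int :=
  (PySem.List.pyRange 0 group_num 1).foldl (fun arr k =>
    let s := k * 5
    let e := min ((k + 1) * 5) (arr.length : Int)
    arr.take (PySem.List.clampIdx arr.length s)
      ++ PySem.List.sorted (PySem.List.slice arr (some s) (some e)) (fun x => x) false
      ++ arr.drop (PySem.List.clampIdx arr.length e)) array

-- ===== PRECONDITION & SPEC =====
def Spec_split_insertSort (array : List Int) (group_num : Int) (out : List Int) : Prop := out = split_insertSort_alt array group_num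
instance (array : List Int) (group_num : Int) (out : List Int) : Decidable (Spec_split_insertSort array group_num out) := by unfold Spec_split_insertSort; infer_instance

-- ===== CLAIM (what is proved, stated in full; the proofs are below) =====
def Claim_equal_split_insertSort : Prop := ∀ (array : List Int) (group_num : Int), Dom_split_insertSort array group_num → Spec_split_insertSort array group_num (split_insertSort array group_num)

-- ===== LEMMAS AND PROOFS =====

-- left-scan insertion of `temp` after all elements ≤ temp
def insL (temp : Int) : List Int → List Int
  | [] => [temp]
  | b :: l => if b ≤ temp then b :: insL temp l else temp :: b :: l

theorem insL_append_gt (temp b : Int) (l : List Int) (hb : b > temp) :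
    insL temp (l ++ [b]) = insL temp l ++ [b] := by
  induction l with
  | nil => simp [insL, not_le.mpr hb]
  | cons c l ih => by_cases h : c ≤ temp <;> simp [insL, h, ih]

theorem insL_all_le (temp : Int) (l : List Int) (h : ∀ a ∈ l, a ≤ temp) :
    insL temp l = l ++ [temp] := by
  induction l with
  | nil => rfl
  | cons c l ih =>
    have hc : c ≤ temp := h c (by simp)
    simp [insL, hc, ih (fun a ha => h a (by simp [ha]))]

theorem insL_perm (temp : Int) (l : List Int) : (insL temp l).Perm (temp :: l) := by
  induction l with
  | nil => rfl
  | cons c l ih =>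
    by_cases h : c ≤ temp
    · simpa [insL, h] using ((ih.cons c).trans (List.Perm.swap temp c l))
    · simp [insL, h]

theorem insL_pairwise (temp : Int) (l : List Int) (h : l.Pairwise (· ≤ ·)) :
    (insL temp l).Pairwise (· ≤ ·) := by
  induction l with
  | nil => simp [insL]
  | cons c l ih =>
    rcases List.pairwise_cons.mp h with ⟨hc, hl⟩
    by_cases hct : c ≤ temp
    · have hmem : ∀ a ∈ insL temp l, c ≤ a := by
        intro a ha
        rcases List.mem_cons.mp ((insL_perm temp l).mem_iff.mp ha) with h1 | h1
        · simpa [h1] using hct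
        · exact hc a h1
      rw [show insL temp (c :: l) = c :: insL temp l from by simp [insL, hct]]
      exact List.pairwise_cons.mpr ⟨hmem, ih hl⟩
    · have hmem : ∀ a ∈ c :: l, temp ≤ a := by
        intro a ha
        rcases List.mem_cons.mp ha with h1 | h1
        · exact le_of_lt (by simpa [h1] using not_le.mp hct)
        · exact le_trans (le_of_lt (not_le.mp hct)) (hc a h1)
      rw [show insL temp (c :: l) = temp :: c :: l from by simp [insL, hct]]
      exact List.pairwise_cons.mpr ⟨hmem, h⟩

theorem length_insL (temp : Int) (l : List Int) : (insL temp l).length = l.length + 1 :=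
  (insL_perm temp l).length_eq

-- write at the seam of an append
theorem set_seam (l r : List Int) (y v : Int) : (l ++ y :: r).set l.length v = l ++ v :: r := by
  induction l with
  | nil => rfl
  | cons c l ih => simp [ih]

theorem getD_seam (l r : List Int) (y : Int) : (l ++ y :: r).getD l.length 0 = y := by
  induction l with
  | nil => rfl
  | cons c l ih => simpa using ih

theorem pyGetD_seam (l r : List Int) (y : Int) :
    PySem.List.pyGetD (l ++ y :: r) ((l.length : Nat) : Int) 0 = y := by
  rw [PySem.List.pyGetD_natCast]; exact getD_seam l r y

theorem pySetD_seam (l r : List Int) (y v : Int) :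
    PySem.List.pySetD (l ++ y :: r) ((l.length : Nat) : Int) v = l ++ v :: r := by
  rw [PySem.List.pySetD_natCast]; exact set_seam l r y v

-- the while loop followed by `array[index] = temp`, on a sorted middle segment
theorem shift_insert (pre : List Int) (mid : List Int) (rest : List Int) (y temp : Int)
    (hm : mid.Pairwise (· ≤ ·)) :
    (fun p => PySem.List.pySetD p.1 p.2 temp)
      (shiftA (pre ++ mid ++ y :: rest) ((pre.length : Nat) : Int)
        (((pre.length + mid.length : Nat)) : Int) temp)
    = pre ++ insL temp mid ++ rest := by
  induction mid using List.reverseRecOn generalizing y rest with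
  | nil =>
    rw [shiftA]
    have hcond : ¬ (((pre.length + ([] : List Int).length : Nat) : Int) > ((pre.length : Nat) : Int) ∧
        PySem.List.pyGetD (pre ++ [] ++ y :: rest) ((((pre.length + ([] : List Int).length : Nat)) : Int) - 1) 0 > temp) := by
      intro h
      have := h.1
      simp at this
    rw [dif_neg hcond]
    simpa [insL] using pySetD_seam pre rest y temp
  | append_singleton m b ih =>
    have hm' : m.Pairwise (· ≤ ·) := (List.pairwise_append.mp hm).1
    have harr : pre ++ (m ++ [b]) ++ y :: rest = (pre ++ m) ++ b :: (y :: rest) := by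
      simp
    have hidx : (((pre.length + (m ++ [b]).length : Nat)) : Int) - 1
        = (((pre ++ m).length : Nat) : Int) := by
      simp; push_cast; ring
    by_cases hb : b > temp
    · -- shift: arr[i] := b, index := i-1, recurse with mid := m
      rw [shiftA]
      have hget : PySem.List.pyGetD (pre ++ (m ++ [b]) ++ y :: rest)
          ((((pre.length + (m ++ [b]).length : Nat)) : Int) - 1) 0 = b := by
        rw [hidx, harr]; exact pyGetD_seam (pre ++ m) (y :: rest) b
      have hcond : (((pre.length + (m ++ [b]).length : Nat)) : Int) > ((pre.length : Nat) : Int) ∧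
          PySem.List.pyGetD (pre ++ (m ++ [b]) ++ y :: rest)
            ((((pre.length + (m ++ [b]).length : Nat)) : Int) - 1) 0 > temp := by
        constructor
        · simp
        · rw [hget]; exact hb
      rw [dif_pos hcond]
      have hset : PySem.List.pySetD (pre ++ (m ++ [b]) ++ y :: rest)
          (((pre.length + (m ++ [b]).length : Nat)) : Int)
          (PySem.List.pyGetD (pre ++ (m ++ [b]) ++ y :: rest)
            ((((pre.length + (m ++ [b]).length : Nat)) : Int) - 1) 0)
          = pre ++ m ++ b :: (b :: rest) := by
        rw [hget]
        have h2 : pre ++ (m ++ [b]) ++ y :: rest = (pre ++ m ++ [b]) ++ y :: rest := by simp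
        have h3 : (((pre.length + (m ++ [b]).length : Nat)) : Int)
            = (((pre ++ m ++ [b]).length : Nat) : Int) := by simp
        rw [h2, h3, pySetD_seam]
        simp
      rw [hset]
      have h4 : pre ++ m ++ b :: (b :: rest) = pre ++ m ++ b :: (b :: rest) := rfl
      have hidx2 : (((pre.length + (m ++ [b]).length : Nat)) : Int) - 1
          = (((pre.length + m.length : Nat)) : Int) := by simp; push_cast; ring
      rw [hidx2]
      have := ih (y := b) (rest := b :: rest) hm'
      simpa [insL_append_gt temp b m hb] using this
    · -- stop: condition false, write temp at index
      rw [shiftA]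
      have hget : PySem.List.pyGetD (pre ++ (m ++ [b]) ++ y :: rest)
          ((((pre.length + (m ++ [b]).length : Nat)) : Int) - 1) 0 = b := by
        rw [hidx, harr]; exact pyGetD_seam (pre ++ m) (y :: rest) b
      have hcond : ¬ ((((pre.length + (m ++ [b]).length : Nat)) : Int) > ((pre.length : Nat) : Int) ∧
          PySem.List.pyGetD (pre ++ (m ++ [b]) ++ y :: rest)
            ((((pre.length + (m ++ [b]).length : Nat)) : Int) - 1) 0 > temp) := by
        intro h
        exact hb (by rw [hget] at h; exact h.2)
      rw [dif_neg hcond]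
      have hall : ∀ a ∈ m ++ [b], a ≤ temp := by
        intro a ha
        rcases List.mem_append.mp ha with h1 | h1
        · have : a ≤ b := by
            rcases List.pairwise_append.mp hm with ⟨_, _, hrel⟩
            exact hrel a h1 b (by simp)
          exact le_trans this (not_lt.mp hb)
        · simp at h1; simpa [h1] using (not_lt.mp hb)
      have h2 : pre ++ (m ++ [b]) ++ y :: rest = (pre ++ (m ++ [b])) ++ y :: rest := by simp
      have h3 : (((pre.length + (m ++ [b]).length : Nat)) : Int)
          = (((pre ++ (m ++ [b])).length : Nat) : Int) := by simp
      simp only [h3]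
      rw [pySetD_seam (pre ++ (m ++ [b])) rest y temp]
      rw [insL_all_le temp (m ++ [b]) hall]
      simp

-- one chunk: the inner `for i` loop turns the (sorted, nonempty) mid segment plus the suf
-- segment into a sorted permutation of mid ++ suf, leaving pre and post untouched
theorem innerFor (suf : List Int) : ∀ (pre mid post : List Int), mid ≠ [] → mid.Pairwise (· ≤ ·) →
    ∃ M : List Int, M.Perm (mid ++ suf) ∧ M.Pairwise (· ≤ ·) ∧ M.length = mid.length + suf.length ∧
      (PySem.List.pyRange ((pre.length + mid.length : Nat) : Int)
          ((pre.length + mid.length + suf.length : Nat) : Int) 1).foldl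
        (bodyA ((pre.length : Nat) : Int)) (pre ++ mid ++ suf ++ post)
      = pre ++ M ++ post := by
  induction suf with
  | nil =>
    intro pre mid post hne hm
    refine ⟨mid, by simp, hm, by simp, ?_⟩
    have : PySem.List.pyRange ((pre.length + mid.length : Nat) : Int)
        ((pre.length + mid.length + 0 : Nat) : Int) 1 = [] := by
      rw [PySem.List.pyRange_one]; simp
    simp [this]
  | cons x rest ih =>
    intro pre mid post hne hm
    -- split the range
    have hlt : ((pre.length + mid.length : Nat) : Int)
        < ((pre.length + mid.length + (x :: rest).length : Nat) : Int) :=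
      Int.ofNat_lt.mpr (by simp)
    rw [PySem.List.pyRange_one_cons hlt]
    rw [List.foldl_cons]
    -- decompose mid from the right
    obtain ⟨m, b, rfl⟩ : ∃ m b, mid = m ++ [b] := by
      rcases List.eq_nil_or_concat mid with h | ⟨m, b, h⟩
      · exact absurd h hne
      · exact ⟨m, b, by simpa using h⟩
    have harr : pre ++ (m ++ [b]) ++ (x :: rest) ++ post
        = (pre ++ (m ++ [b])) ++ x :: (rest ++ post) := by simp
    have hgi : PySem.List.pyGetD (pre ++ (m ++ [b]) ++ (x :: rest) ++ post)
        ((pre.length + (m ++ [b]).length : Nat) : Int) 0 = x := by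
      have h3 : ((pre.length + (m ++ [b]).length : Nat) : Int)
          = (((pre ++ (m ++ [b])).length : Nat) : Int) := by simp
      rw [harr, h3]; exact pyGetD_seam _ _ x
    have hgi1 : PySem.List.pyGetD (pre ++ (m ++ [b]) ++ (x :: rest) ++ post)
        (((pre.length + (m ++ [b]).length : Nat) : Int) - 1) 0 = b := by
      have harr2 : pre ++ (m ++ [b]) ++ (x :: rest) ++ post
          = (pre ++ m) ++ b :: (x :: (rest ++ post)) := by simp
      have h3 : ((pre.length + (m ++ [b]).length : Nat) : Int) - 1
          = (((pre ++ m).length : Nat) : Int) := by simp; push_cast; ring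
      rw [harr2, h3]; exact pyGetD_seam _ _ b
    by_cases hbx : b > x
    · -- insertion happens
      have hbody : bodyA ((pre.length : Nat) : Int)
          (pre ++ (m ++ [b]) ++ (x :: rest) ++ post)
          ((pre.length + (m ++ [b]).length : Nat) : Int)
          = pre ++ insL x (m ++ [b]) ++ (rest ++ post) := by
        unfold bodyA
        rw [if_pos (by rw [hgi1, hgi]; exact hbx)]
        rw [hgi]
        have := shift_insert pre (m ++ [b]) (rest ++ post) x x hm
        simpa [harr] using this
      rw [hbody]
      -- recurse with mid := insL x (m ++ [b])
      have hlen : (insL x (m ++ [b])).length = (m ++ [b]).length + 1 := length_insL _ _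
      have hne' : insL x (m ++ [b]) ≠ [] := by
        intro h; rw [h] at hlen; simp at hlen
      obtain ⟨M, hperm, hpw, hML, heq⟩ := ih pre (insL x (m ++ [b])) post hne'
        (insL_pairwise x (m ++ [b]) hm)
      refine ⟨M, ?_, hpw, by simp [length_insL] at hML ⊢; omega, ?_⟩
      · refine hperm.trans ?_
        have h1 := (insL_perm x (m ++ [b])).append_right rest
        exact h1.trans (List.perm_middle (a := x) (l₁ := m ++ [b]) (l₂ := rest)).symm
      · have hidx : ((pre.length + (insL x (m ++ [b])).length : Nat) : Int)
            = ((pre.length + (m ++ [b]).length : Nat) : Int) + 1 := by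
          rw [hlen]; push_cast; ring
        have hidx2 : ((pre.length + (insL x (m ++ [b])).length + rest.length : Nat) : Int)
            = ((pre.length + (m ++ [b]).length + (x :: rest).length : Nat) : Int) := by
          rw [hlen]; simp; push_cast; ring
        rw [hidx, hidx2] at heq
        have hassoc : pre ++ insL x (m ++ [b]) ++ (rest ++ post)
            = pre ++ insL x (m ++ [b]) ++ rest ++ post := by simp
        rw [hassoc]
        exact heq
    · -- no insertion: mid grows by x
      have hbody : bodyA ((pre.length : Nat) : Int)
          (pre ++ (m ++ [b]) ++ (x :: rest) ++ post)
          ((pre.length + (m ++ [b]).length : Nat) : Int)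
          = pre ++ (m ++ [b]) ++ (x :: rest) ++ post := by
        unfold bodyA
        rw [if_neg (by rw [hgi1, hgi]; exact hbx)]
      rw [hbody]
      have hm' : ((m ++ [b]) ++ [x]).Pairwise (· ≤ ·) := by
        rw [List.pairwise_append]
        refine ⟨hm, by simp, ?_⟩
        intro a ha c hc
        simp at hc; subst hc
        have hax : a ≤ b := by
          rcases List.mem_append.mp ha with h1 | h1
          · rcases List.pairwise_append.mp hm with ⟨_, _, hrel⟩
            exact hrel a h1 b (by simp)
          · simp at h1; simp [h1]
        exact le_trans hax (not_lt.mp hbx)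
      obtain ⟨M, hperm, hpw, hML, heq⟩ := ih pre ((m ++ [b]) ++ [x]) post (by simp) hm'
      refine ⟨M, ?_, hpw, by simp [length_insL] at hML ⊢; omega, ?_⟩
      · refine hperm.trans ?_
        simp
      · have hidx : ((pre.length + ((m ++ [b]) ++ [x]).length : Nat) : Int)
            = ((pre.length + (m ++ [b]).length : Nat) : Int) + 1 := by
          simp; push_cast; ring
        have hidx2 : ((pre.length + ((m ++ [b]) ++ [x]).length + rest.length : Nat) : Int)
            = ((pre.length + (m ++ [b]).length + (x :: rest).length : Nat) : Int) := by
          simp; push_cast; ring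
        rw [hidx, hidx2] at heq
        have hassoc : pre ++ ((m ++ [b]) ++ [x]) ++ rest ++ post
            = pre ++ (m ++ [b]) ++ (x :: rest) ++ post := by simp
        rw [hassoc] at heq
        exact heq

-- one group: the inner insertion-sort loop equals take ++ sorted slice ++ drop
theorem chunk_eq (arr : List Int) (s : Int) (hs : 0 ≤ s) :
    (PySem.List.pyRange (s + 1) (min (s + 5) (arr.length : Int)) 1).foldl (bodyA s) arr
    = arr.take (PySem.List.clampIdx arr.length s)
      ++ PySem.List.sorted (PySem.List.slice arr (some s) (some (min (s + 5) (arr.length : Int)))) (fun x => x) false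
      ++ arr.drop (PySem.List.clampIdx arr.length (min (s + 5) (arr.length : Int))) := by
  obtain ⟨sN, rfl⟩ : ∃ n : Nat, s = (n : Int) := ⟨s.toNat, (Int.toNat_of_nonneg hs).symm⟩
  have hmin : min ((sN : Int) + 5) (arr.length : Int) = ((min (sN + 5) arr.length : Nat) : Int) := by
    push_cast; rfl
  rw [hmin]
  set eN := min (sN + 5) arr.length with heN
  by_cases hL : arr.length ≤ sN
  · -- group start at or past the end: everything is a no-op
    have heL : eN = arr.length := by omega
    have hrange : PySem.List.pyRange ((sN : Int) + 1) ((eN : Nat) : Int) 1 = [] := by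
      rw [PySem.List.pyRange_one]
      have : (((eN : Nat) : Int) - ((sN : Int) + 1)).toNat = 0 := by omega
      rw [this]; rfl
    rw [hrange]
    have hslice : PySem.List.slice arr (some ((sN : Nat) : Int)) (some ((eN : Nat) : Int)) = [] := by
      rw [PySem.List.slice_natCast]
      simp [List.drop_eq_nil_of_le hL]
    rw [hslice]
    have hsorted : PySem.List.sorted ([] : List Int) (fun x => x) false = [] := rfl
    rw [hsorted]
    rw [PySem.List.clampIdx_natCast, PySem.List.clampIdx_natCast]
    have h1 : min sN arr.length = arr.length := by omega
    have h2 : min eN arr.length = arr.length := by omega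
    rw [h1, h2]
    simp
  · -- a real chunk [sN, eN)
    have hse : sN < eN := by omega
    have heL : eN ≤ arr.length := by omega
    set pre := arr.take sN with hpre
    set chunk := (arr.drop sN).take (eN - sN) with hchunk
    set post := arr.drop eN with hpost
    have hdecomp : arr = pre ++ chunk ++ post := by
      have h3 : (arr.drop sN).drop (eN - sN) = arr.drop eN := by
        rw [List.drop_drop]; congr 1; omega
      have h2 := List.take_append_drop (eN - sN) (arr.drop sN)
      rw [h3] at h2
      rw [hpre, hchunk, hpost, List.append_assoc, h2, List.take_append_drop]
    have hprelen : pre.length = sN := by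
      rw [hpre, List.length_take]; omega
    have hchunklen : chunk.length = eN - sN := by
      rw [hchunk, List.length_take, List.length_drop]; omega
    obtain ⟨x, suf, hxs⟩ : ∃ x suf, chunk = x :: suf := by
      cases hc : chunk with
      | nil => rw [hc] at hchunklen; simp at hchunklen; omega
      | cons x suf => exact ⟨x, suf, rfl⟩
    obtain ⟨M, hperm, hpw, hML, heq⟩ := innerFor suf pre [x] post (by simp) (by simp)
    have hsuf : suf.length = eN - sN - 1 := by
      have := hchunklen; rw [hxs] at this; simp at this; omega
    -- match the fold
    have hq1 : ((pre.length : Nat) : Int) = ((sN : Nat) : Int) := by rw [hprelen]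
    have hr1 : ((pre.length + ([x] : List Int).length : Nat) : Int) = ((sN : Nat) : Int) + 1 := by
      simp [hprelen]
    have hr2 : ((pre.length + ([x] : List Int).length + suf.length : Nat) : Int) = ((eN : Nat) : Int) := by
      simp [hprelen, hsuf]; omega
    rw [hr1, hr2, hq1] at heq
    have harr : pre ++ [x] ++ suf ++ post = arr := by
      rw [hdecomp, hxs]; simp
    rw [harr] at heq
    rw [heq]
    -- match the slice-assignment side
    have hclamps : PySem.List.clampIdx arr.length ((sN : Nat) : Int) = sN := by
      rw [PySem.List.clampIdx_natCast]; omega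
    have hclampe : PySem.List.clampIdx arr.length ((eN : Nat) : Int) = eN := by
      rw [PySem.List.clampIdx_natCast]; omega
    have hslice : PySem.List.slice arr (some ((sN : Nat) : Int)) (some ((eN : Nat) : Int)) = chunk := by
      rw [PySem.List.slice_natCast, hchunk]
    have hsorted : PySem.List.sorted chunk (fun x => x) false = M := by
      apply PySem.List.sorted_id_eq_of_perm_of_pairwise
      · rw [hxs]; simpa using hperm
      · exact hpw
    rw [hclamps, hclampe, hslice, hsorted, ← hpre, ← hpost]

-- the two per-k outer-loop bodies agree on every accumulator, for k ≥ 0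
theorem body_eq (arr : List Int) (k : Int) (hk : 0 ≤ k) :
    (PySem.List.pyRange (k * 5 + 1) (min ((k + 1) * 5) (arr.length : Int)) 1).foldl (bodyA (k * 5)) arr
    = arr.take (PySem.List.clampIdx arr.length (k * 5))
      ++ PySem.List.sorted (PySem.List.slice arr (some (k * 5)) (some (min ((k + 1) * 5) (arr.length : Int)))) (fun x => x) false
      ++ arr.drop (PySem.List.clampIdx arr.length (min ((k + 1) * 5) (arr.length : Int))) := by
  have h5 : (k + 1) * 5 = k * 5 + 5 := by ring
  rw [h5]
  exact chunk_eq arr (k * 5) (by omega)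

theorem split_insertSort_spec' : ∀ (array : List Int) (group_num : Int),
    split_insertSort array group_num = split_insertSort_alt array group_num := by
  intro array group_num
  unfold split_insertSort split_insertSort_alt
  refine PySem.List.foldl_congr_mem _ _ _ _ (fun acc x hx => ?_)
  have hx0 : (0 : Int) ≤ x := (PySem.List.mem_pyRange_one.mp hx).1
  exact body_eq acc x hx0

-- ===== VERDICT (by name: the statement is the Claim_ definition above) =====
theorem split_insertSort_spec : Claim_equal_split_insertSort := by
  intro array group_num _
  unfold Spec_split_insertSort
  exact split_insertSort_spec' array group_num
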